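-- pv_equiv track=rewrite | github.com/socathie/CodeFights | Tournaments/holesErasing.py | holesErasing
-- ===== SOURCE A (Python) =====
-- def holesErasing(matrix):
--
--     answer = []
--     for i in range(len(matrix)):
--         line = []
--         for j in range(len(matrix[0])):
--             if not matrix[i][j]:
--                 hole = True
--                 for dx in range(-1, 2):
--                     for dy in range(-1, 2):
--                         if dx!=dy:
--                             if (0 <= i + dx and i + dx < len(matrix)
--                             and 0 <= j + dy and j + dy < len(matrix[0])):
--                                 if not matrix[i + dx][j + dy]:
--                                     hole = False
--                 if hole:
--                     line.append(True)
--                 else: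
--                     line.append(False)
--             else:
--                 line.append(True)
--         answer.append(line)
--
--     return answer
-- ===== SOURCE B (Python) =====
-- def holesErasing(matrix):
--     # Sweep formulation: start from an all-True grid, then for each of the 3
--     # forward neighbor offsets un-mark BOTH endpoints of every zero-zero pair
--     # (the 6-neighbor relation is symmetric, so 3 forward offsets cover all 6).
--     n = len(matrix)
--     m = len(matrix[0]) if matrix else 0
--     answer = [[True] * m for _ in range(n)]
--     for dx, dy in ((0, 1), (1, 0), (1, -1)):
--         for i in range(n):
--             for j in range(m):
--                 x = i + dx
--                 y = j + dy
--                 if 0 <= x < n and 0 <= y < m and not matrix[i][j] and not matrix[x][y]: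
--                     answer[i][j] = False
--                     answer[x][y] = False
--     return answer
-- ===== Notes on version B (the rewrite author's own statement) =====
-- stated objective: alternative
-- what changed: Instead of scanning each zero cell's 9-offset neighborhood with a hole flag, B starts from an all-True grid and makes one sweep per forward offset ((0,1),(1,0),(1,-1)), un-marking BOTH endpoints of every in-bounds zero-zero pair, exploiting symmetry of the 6-neighbor relation.
import Mathlib
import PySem

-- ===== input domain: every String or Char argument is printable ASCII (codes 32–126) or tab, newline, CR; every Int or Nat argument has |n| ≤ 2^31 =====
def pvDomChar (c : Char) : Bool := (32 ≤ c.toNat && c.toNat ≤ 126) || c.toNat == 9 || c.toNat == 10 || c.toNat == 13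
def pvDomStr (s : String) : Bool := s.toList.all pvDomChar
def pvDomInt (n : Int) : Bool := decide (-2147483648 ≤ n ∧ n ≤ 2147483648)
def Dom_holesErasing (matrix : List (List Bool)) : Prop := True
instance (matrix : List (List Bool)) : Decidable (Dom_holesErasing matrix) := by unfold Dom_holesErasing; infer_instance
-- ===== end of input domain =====

-- B re-implements the hole marking as three whole-grid direction sweeps over a mutable
-- answer grid instead of A's per-cell 6-neighborhood scan; same return value on Pre_.

-- ===== PORT A =====
-- matrix[i][j] read (total under Pre_, which puts every read in range)
def pvCell (g : List (List Bool)) (i j : Int) : Bool :=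
  PySem.List.pyGetD (PySem.List.pyGetD g i []) j false

def holesErasing (matrix : List (List Bool)) : List (List Bool) :=
  (PySem.List.pyRange 0 (matrix.length : Int) 1).foldl (fun answer i =>
    let line := (PySem.List.pyRange 0 ((PySem.List.pyGetD matrix 0 []).length : Int) 1).foldl (fun line j =>
      if !(pvCell matrix i j) then
        let hole := (PySem.List.pyRange (-1) 2 1).foldl (fun hole dx =>
          (PySem.List.pyRange (-1) 2 1).foldl (fun hole dy =>
            if dx ≠ dy then
              if 0 ≤ i + dx ∧ i + dx < (matrix.length : Int) ∧
                 0 ≤ j + dy ∧ j + dy < ((PySem.List.pyGetD matrix 0 []).length : Int) then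
                if !(pvCell matrix (i + dx) (j + dy)) then false else hole
              else hole
            else hole) hole) true
        if hole then line ++ [true] else line ++ [false]
      else line ++ [true]) []
    answer ++ [line]) []

-- ===== PORT B =====
-- answer[i][j] = v (indices guarded non-negative and in range by Source B's if)
def pvSet2 (g : List (List Bool)) (i j : Int) (v : Bool) : List (List Bool) :=
  PySem.List.pySetD g i (PySem.List.pySetD (PySem.List.pyGetD g i []) j v)

def holesErasing_alt (matrix : List (List Bool)) : List (List Bool) :=
  let n : Int := matrix.length
  let m : Int := if matrix ≠ [] then ((PySem.List.pyGetD matrix 0 []).length : Int) else 0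
  let answer0 : List (List Bool) :=
    (PySem.List.pyRange 0 n 1).map (fun _ => List.replicate m.toNat true)
  [((0 : Int), (1 : Int)), (1, 0), (1, -1)].foldl (fun answer d =>
    (PySem.List.pyRange 0 n 1).foldl (fun answer i =>
      (PySem.List.pyRange 0 m 1).foldl (fun answer j =>
        let x := i + d.1
        let y := j + d.2
        if 0 ≤ x ∧ x < n ∧ 0 ≤ y ∧ y < m ∧
           !(pvCell matrix i j) ∧ !(pvCell matrix x y) then
          pvSet2 (pvSet2 answer i j false) x y false
        else answer) answer) answer) answer0

-- ===== PRECONDITION & SPEC =====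
-- A raises IndexError exactly when some row is shorter than row 0 (it reads matrix[i][j]
-- for every j < len(matrix[0])); Pre_ admits exactly the inputs where A returns.
def Pre_holesErasing (matrix : List (List Bool)) : Prop :=
  ∀ row ∈ matrix, (matrix.headD []).length ≤ row.length
instance (matrix : List (List Bool)) : Decidable (Pre_holesErasing matrix) := by
  unfold Pre_holesErasing; infer_instance

def pvWitness_holesErasing : List (List Bool) := [[false, true], [true, false]]

def Spec_holesErasing (matrix : List (List Bool)) (out : List (List Bool)) : Prop := out = holesErasing_alt matrix
instance (matrix : List (List Bool)) (out : List (List Bool)) : Decidable (Spec_holesErasing matrix out) := by unfold Spec_holesErasing; infer_instance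

-- ===== CLAIM (what is proved, stated in full; the proofs are below) =====
def Claim_equal_holesErasing : Prop := ∀ (matrix : List (List Bool)), Dom_holesErasing matrix → Pre_holesErasing matrix → Spec_holesErasing matrix (holesErasing matrix)


-- ===== LEMMAS AND PROOFS =====

def pvZero (matrix : List (List Bool)) (i j : Int) : Bool :=
  decide (0 ≤ i ∧ i < (matrix.length : Int) ∧ 0 ≤ j ∧ j < ((PySem.List.pyGetD matrix 0 []).length : Int))
    && !(pvCell matrix i j)
def pvOffs6 : List (Int × Int) := [(-1,0),(-1,1),(0,-1),(0,1),(1,-1),(1,0)]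
def pvSpecCell (matrix : List (List Bool)) (i j : Int) : Bool :=
  pvCell matrix i j || !(pvOffs6.any (fun d => pvZero matrix (i + d.1) (j + d.2)))
def pvSpecGrid (matrix : List (List Bool)) : List (List Bool) :=
  (PySem.List.pyRange 0 (matrix.length : Int) 1).map (fun i =>
    (PySem.List.pyRange 0 ((PySem.List.pyGetD matrix 0 []).length : Int) 1).map (fun j =>
      pvSpecCell matrix i j))
def pvShape (n m : Nat) (g : List (List Bool)) : Prop :=
  g.length = n ∧ ∀ r ∈ g, r.length = m
lemma pvShape_set2 (n m : Nat) (g : List (List Bool)) (hg : pvShape n m g) (a b : Int)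
    (ha0 : 0 ≤ a) (ha : a < (n : Int)) (v : Bool) : pvShape n m (pvSet2 g a b v) := by
  obtain ⟨hl, hr⟩ := hg
  have haN : a.toNat < g.length := by omega
  unfold pvSet2
  rw [PySem.List.pySetD_of_nonneg _ _ ha0]
  refine ⟨by simpa using hl, ?_⟩
  intro r hrm
  rcases List.mem_or_eq_of_mem_set hrm with h | h
  · exact hr r h
  · subst h
    rw [PySem.List.pyGetD_eq_getElem _ _ ha0 (by omega)]
    rw [PySem.List.length_pySetD]
    exact hr _ (List.getElem_mem haN)

lemma pvCell_set2 (n m : Nat) (g : List (List Bool)) (hg : pvShape n m g)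
    (a b p q : Int) (ha0 : 0 ≤ a) (ha : a < (n : Int)) (hb0 : 0 ≤ b) (hb : b < (m : Int))
    (hp0 : 0 ≤ p) (hp : p < (n : Int)) (hq0 : 0 ≤ q) (hq : q < (m : Int)) (v : Bool) :
    pvCell (pvSet2 g a b v) p q = if p = a ∧ q = b then v else pvCell g p q := by
  obtain ⟨hl, hr⟩ := hg
  have haN : a.toNat < g.length := by omega
  have hrowlen : ∀ (x : Int), 0 ≤ x → x < (n : Int) → (PySem.List.pyGetD g x []).length = m := by
    intro x hx0 hx
    rw [PySem.List.pyGetD_eq_getElem _ _ hx0 (by omega)]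
    exact hr _ (List.getElem_mem (by omega))
  unfold pvSet2 pvCell
  rw [PySem.List.pySetD_of_nonneg _ _ ha0]
  rw [PySem.List.pyGetD_eq_getElem (g.set a.toNat _) _ hp0 (by simpa using by omega)]
  rw [List.getElem_set]
  by_cases hpa : p = a
  · have : a.toNat = p.toNat := by omega
    rw [if_pos (by omega)]
    rw [PySem.List.pySetD_of_nonneg _ _ hb0]
    rw [PySem.List.pyGetD_eq_getElem _ _ ha0 (by omega)]
    by_cases hqb : q = b
    · rw [if_pos ⟨hpa, hqb⟩]
      rw [PySem.List.pyGetD_eq_getElem _ _ hq0 (by rw [List.length_set]; rw [show g[a.toNat] = PySem.List.pyGetD g a [] from (PySem.List.pyGetD_eq_getElem _ _ ha0 (by omega)).symm, hrowlen a ha0 ha]; omega)]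
      rw [List.getElem_set, if_pos (by omega)]
    · rw [if_neg (by tauto)]
      rw [PySem.List.pyGetD_eq_getElem _ _ hq0 (by rw [List.length_set, show g[a.toNat] = PySem.List.pyGetD g a [] from (PySem.List.pyGetD_eq_getElem _ _ ha0 (by omega)).symm, hrowlen a ha0 ha]; omega)]
      rw [List.getElem_set, if_neg (by omega)]
      rw [PySem.List.pyGetD_eq_getElem g _ hp0 (by omega)]
      rw [PySem.List.pyGetD_eq_getElem _ _ hq0 (by rw [show g[p.toNat] = PySem.List.pyGetD g p [] from (PySem.List.pyGetD_eq_getElem _ _ hp0 (by omega)).symm, hrowlen p hp0 hp]; omega)]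
      have : p.toNat = a.toNat := by omega
      simp [this]
  · rw [if_neg (by omega), if_neg (by tauto)]
    rw [PySem.List.pyGetD_eq_getElem g _ hp0 (by omega)]

lemma pvBool_shift (x b1 b2 : Bool) : ((x && !b1) && !b2) = (x && !(b1 || b2)) := by
  cases x <;> cases b1 <;> cases b2 <;> rfl

lemma pvFoldMark {α : Type} (n m : Nat) (L : List α)
    (F : List (List Bool) → α → List (List Bool)) (mark : α → Int → Int → Bool)
    (h : ∀ g a, a ∈ L → pvShape n m g → pvShape n m (F g a) ∧
      ∀ p q : Int, 0 ≤ p → p < (n : Int) → 0 ≤ q → q < (m : Int) →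
        pvCell (F g a) p q = (pvCell g p q && !(mark a p q))) :
    ∀ g, pvShape n m g → pvShape n m (L.foldl F g) ∧
      ∀ p q : Int, 0 ≤ p → p < (n : Int) → 0 ≤ q → q < (m : Int) →
        pvCell (L.foldl F g) p q = (pvCell g p q && !(L.any (fun a => mark a p q))) := by
  induction L with
  | nil => intro g hg; simpa using hg
  | cons a L ih =>
    intro g hg
    have ha := h g a (List.mem_cons_self) hg
    have hrec := ih (fun g' a' ha' hg' => h g' a' (List.mem_cons_of_mem _ ha') hg') (F g a) ha.1
    refine ⟨hrec.1, ?_⟩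
    intro p q hp0 hp hq0 hq
    rw [List.foldl_cons] at *
    rw [hrec.2 p q hp0 hp hq0 hq, ha.2 p q hp0 hp hq0 hq, List.any_cons, pvBool_shift]


lemma pvSweep_any (matrix : List (List Bool)) (dx dy p q : Int)
    (hp0 : 0 ≤ p) (hp : p < (matrix.length : Int)) (hq0 : 0 ≤ q)
    (hq : q < ((PySem.List.pyGetD matrix 0 []).length : Int)) :
    ((PySem.List.pyRange 0 (matrix.length : Int) 1).any fun i =>
      (PySem.List.pyRange 0 ((PySem.List.pyGetD matrix 0 []).length : Int) 1).any fun j =>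
        decide (0 ≤ i + dx ∧ i + dx < (matrix.length : Int) ∧
                0 ≤ j + dy ∧ j + dy < ((PySem.List.pyGetD matrix 0 []).length : Int) ∧
                (!(pvCell matrix i j)) = true ∧ (!(pvCell matrix (i + dx) (j + dy))) = true)
          && (decide (p = i ∧ q = j) || decide (p = i + dx ∧ q = j + dy)))
    = (pvZero matrix p q && (pvZero matrix (p + dx) (q + dy) || pvZero matrix (p - dx) (q - dy))) := by
  rw [Bool.eq_iff_iff]
  simp only [List.any_eq_true, PySem.List.mem_pyRange_one, pvZero, Bool.and_eq_true,
    Bool.or_eq_true, decide_eq_true_eq, Bool.not_eq_eq_eq_not, Bool.not_true]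
  constructor
  · rintro ⟨i, ⟨hi0, hin⟩, j, ⟨hj0, hjm⟩, ⟨hx0, hxn, hy0, hym, hc1, hc2⟩, hrole | hrole⟩
    · obtain ⟨hpi, hqj⟩ := hrole; subst hpi; subst hqj
      exact ⟨⟨by omega, by simpa using hc1⟩, Or.inl ⟨by omega, by simpa using hc2⟩⟩
    · obtain ⟨hpi, hqj⟩ := hrole; subst hpi; subst hqj
      refine ⟨⟨by omega, by simpa using hc2⟩, Or.inr ?_⟩
      have e1 : i + dx - dx = i := by ring
      have e2 : j + dy - dy = j := by ring
      rw [e1, e2]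
      exact ⟨by omega, by simpa using hc1⟩
  · rintro ⟨⟨hb, hc⟩, ⟨hb', hc'⟩ | ⟨hb', hc'⟩⟩
    · exact ⟨p, by omega, q, by omega, ⟨by omega, by omega, by omega, by omega,
        by simpa using hc, by simpa using hc'⟩, Or.inl ⟨rfl, rfl⟩⟩
    · refine ⟨p - dx, by omega, q - dy, by omega, ?_, Or.inr ⟨by ring, by ring⟩⟩
      have e1 : p - dx + dx = p := by ring
      have e2 : q - dy + dy = q := by ring
      rw [e1, e2]
      exact ⟨by omega, by omega, by omega, by omega, by simpa using hc', by simpa using hc⟩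


def pvF1 (matrix : List (List Bool)) (d : Int × Int) (i : Int)
    (g : List (List Bool)) (j : Int) : List (List Bool) :=
  if 0 ≤ i + d.1 ∧ i + d.1 < (matrix.length : Int) ∧
     0 ≤ j + d.2 ∧ j + d.2 < ((PySem.List.pyGetD matrix 0 []).length : Int) ∧
     !(pvCell matrix i j) ∧ !(pvCell matrix (i + d.1) (j + d.2)) then
    pvSet2 (pvSet2 g i j false) (i + d.1) (j + d.2) false
  else g

def pvMark1 (matrix : List (List Bool)) (d : Int × Int) (i : Int) (j p q : Int) : Bool :=
  decide (0 ≤ i + d.1 ∧ i + d.1 < (matrix.length : Int) ∧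
          0 ≤ j + d.2 ∧ j + d.2 < ((PySem.List.pyGetD matrix 0 []).length : Int) ∧
          (!(pvCell matrix i j)) = true ∧ (!(pvCell matrix (i + d.1) (j + d.2))) = true)
    && (decide (p = i ∧ q = j) || decide (p = i + d.1 ∧ q = j + d.2))

lemma pvH1 (matrix : List (List Bool)) (d : Int × Int) (i : Int)
    (hi0 : 0 ≤ i) (hin : i < (matrix.length : Int)) :
    ∀ g j, j ∈ PySem.List.pyRange 0 ((PySem.List.pyGetD matrix 0 []).length : Int) 1 →
      pvShape matrix.length (PySem.List.pyGetD matrix 0 []).length g →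
      pvShape matrix.length (PySem.List.pyGetD matrix 0 []).length (pvF1 matrix d i g j) ∧
      ∀ p q : Int, 0 ≤ p → p < (matrix.length : Int) → 0 ≤ q →
        q < ((PySem.List.pyGetD matrix 0 []).length : Int) →
        pvCell (pvF1 matrix d i g j) p q = (pvCell g p q && !(pvMark1 matrix d i j p q)) := by
  intro g j hj hg
  rw [PySem.List.mem_pyRange_one] at hj
  unfold pvF1 pvMark1
  by_cases hG : 0 ≤ i + d.1 ∧ i + d.1 < (matrix.length : Int) ∧
      0 ≤ j + d.2 ∧ j + d.2 < ((PySem.List.pyGetD matrix 0 []).length : Int) ∧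
      (!(pvCell matrix i j)) = true ∧ (!(pvCell matrix (i + d.1) (j + d.2))) = true
  · rw [if_pos hG]
    obtain ⟨hx0, hxn, hy0, hym, _, _⟩ := hG
    have hg1 := pvShape_set2 _ _ g hg i j hi0 hin false
    refine ⟨pvShape_set2 _ _ _ hg1 _ _ hx0 hxn false, ?_⟩
    intro p q hp0 hp hq0 hq
    rw [pvCell_set2 _ _ _ hg1 _ _ p q hx0 hxn hy0 hym hp0 hp hq0 hq false]
    rw [pvCell_set2 _ _ _ hg _ _ p q hi0 hin hj.1 hj.2 hp0 hp hq0 hq false]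
    by_cases hr1 : p = i ∧ q = j <;> by_cases hr2 : p = i + d.1 ∧ q = j + d.2 <;>
      simp [*]
  · rw [if_neg hG]
    refine ⟨hg, ?_⟩
    intro p q _ _ _ _
    rw [decide_eq_false hG]
    simp

def pvMark2 (matrix : List (List Bool)) (d : Int × Int) (i p q : Int) : Bool :=
  (PySem.List.pyRange 0 ((PySem.List.pyGetD matrix 0 []).length : Int) 1).any fun j =>
    pvMark1 matrix d i j p q

def pvMark3 (matrix : List (List Bool)) (d : Int × Int) (p q : Int) : Bool :=
  (PySem.List.pyRange 0 (matrix.length : Int) 1).any fun i => pvMark2 matrix d i p q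

lemma pvH3 (matrix : List (List Bool)) :
    ∀ g (d : Int × Int), d ∈ [((0 : Int), (1 : Int)), (1, 0), (1, -1)] →
      pvShape matrix.length (PySem.List.pyGetD matrix 0 []).length g →
      pvShape matrix.length (PySem.List.pyGetD matrix 0 []).length
        ((PySem.List.pyRange 0 (matrix.length : Int) 1).foldl
          (fun g i => (PySem.List.pyRange 0 ((PySem.List.pyGetD matrix 0 []).length : Int) 1).foldl
            (pvF1 matrix d i) g) g) ∧
      ∀ p q : Int, 0 ≤ p → p < (matrix.length : Int) → 0 ≤ q →
        q < ((PySem.List.pyGetD matrix 0 []).length : Int) →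
        pvCell ((PySem.List.pyRange 0 (matrix.length : Int) 1).foldl
          (fun g i => (PySem.List.pyRange 0 ((PySem.List.pyGetD matrix 0 []).length : Int) 1).foldl
            (pvF1 matrix d i) g) g) p q
          = (pvCell g p q && !(pvMark3 matrix d p q)) := by
  intro g d _ hg
  have h2 := pvFoldMark matrix.length (PySem.List.pyGetD matrix 0 []).length
    (PySem.List.pyRange 0 (matrix.length : Int) 1)
    (fun g i => (PySem.List.pyRange 0 ((PySem.List.pyGetD matrix 0 []).length : Int) 1).foldl
      (pvF1 matrix d i) g)
    (fun i p q => pvMark2 matrix d i p q)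
    (fun g i hi hg => by
      rw [PySem.List.mem_pyRange_one] at hi
      have h1 := pvFoldMark matrix.length (PySem.List.pyGetD matrix 0 []).length
        (PySem.List.pyRange 0 ((PySem.List.pyGetD matrix 0 []).length : Int) 1)
        (pvF1 matrix d i) (fun j p q => pvMark1 matrix d i j p q)
        (fun g j hj hg => pvH1 matrix d i hi.1 hi.2 g j hj hg) g hg
      exact ⟨h1.1, fun p q hp0 hp hq0 hq => h1.2 p q hp0 hp hq0 hq⟩)
    g hg
  exact ⟨h2.1, fun p q hp0 hp hq0 hq => h2.2 p q hp0 hp hq0 hq⟩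

lemma pvMark3_eq (matrix : List (List Bool)) (d : Int × Int) (p q : Int)
    (hp0 : 0 ≤ p) (hp : p < (matrix.length : Int)) (hq0 : 0 ≤ q)
    (hq : q < ((PySem.List.pyGetD matrix 0 []).length : Int)) :
    pvMark3 matrix d p q
      = (pvZero matrix p q && (pvZero matrix (p + d.1) (q + d.2) || pvZero matrix (p - d.1) (q - d.2))) := by
  exact pvSweep_any matrix d.1 d.2 p q hp0 hp hq0 hq

lemma pvZero_self (matrix : List (List Bool)) (p q : Int)
    (hp0 : 0 ≤ p) (hp : p < (matrix.length : Int)) (hq0 : 0 ≤ q)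
    (hq : q < ((PySem.List.pyGetD matrix 0 []).length : Int)) :
    pvZero matrix p q = !(pvCell matrix p q) := by
  unfold pvZero
  rw [decide_eq_true ⟨hp0, hp, hq0, hq⟩, Bool.true_and]

lemma pvCellFinal (matrix : List (List Bool)) (p q : Int)
    (hp0 : 0 ≤ p) (hp : p < (matrix.length : Int)) (hq0 : 0 ≤ q)
    (hq : q < ((PySem.List.pyGetD matrix 0 []).length : Int)) :
    (true && !([((0 : Int), (1 : Int)), (1, 0), (1, -1)].any fun d => pvMark3 matrix d p q))
      = pvSpecCell matrix p q := by
  simp only [List.any_cons, List.any_nil, pvMark3_eq matrix _ p q hp0 hp hq0 hq, Bool.or_false,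
    Bool.true_and, pvSpecCell, pvOffs6, pvZero_self matrix p q hp0 hp hq0 hq,
    add_zero, sub_zero, sub_neg_eq_add, ← sub_eq_add_neg]
  generalize pvCell matrix p q = c
  generalize pvZero matrix (p - 1) q = z1
  generalize pvZero matrix (p - 1) (q + 1) = z2
  generalize pvZero matrix p (q - 1) = z3
  generalize pvZero matrix p (q + 1) = z4
  generalize pvZero matrix (p + 1) (q - 1) = z5
  generalize pvZero matrix (p + 1) q = z6
  revert c z1 z2 z3 z4 z5 z6
  decide

lemma pvShape_ans0 (matrix : List (List Bool)) :
    pvShape matrix.length (PySem.List.pyGetD matrix 0 []).length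
      ((PySem.List.pyRange 0 (matrix.length : Int) 1).map
        (fun _ => List.replicate (PySem.List.pyGetD matrix 0 []).length true)) := by
  constructor
  · simp [PySem.List.length_pyRange_one]
  · intro r hr
    rcases List.mem_map.mp hr with ⟨_, _, h⟩
    simp [← h]

lemma pvCell_ans0 (matrix : List (List Bool)) (p q : Int)
    (hp0 : 0 ≤ p) (hp : p < (matrix.length : Int)) (hq0 : 0 ≤ q)
    (hq : q < ((PySem.List.pyGetD matrix 0 []).length : Int)) :
    pvCell ((PySem.List.pyRange 0 (matrix.length : Int) 1).map
        (fun _ => List.replicate (PySem.List.pyGetD matrix 0 []).length true)) p q = true := by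
  unfold pvCell
  rw [PySem.List.pyGetD_eq_getElem _ _ hp0
    (by simp [PySem.List.length_pyRange_one]; omega)]
  rw [List.getElem_map]
  rw [PySem.List.pyGetD_eq_getElem _ _ hq0 (by simp; omega)]
  simp

lemma pvCell_eq_getElem (g : List (List Bool)) (p q : Nat)
    (hp : p < g.length) (hq : q < (g[p]).length) :
    pvCell g (p : Int) (q : Int) = (g[p])[q] := by
  unfold pvCell
  rw [PySem.List.pyGetD_eq_getElem _ _ (Int.natCast_nonneg p) (by exact_mod_cast hp)]
  simp only [Int.toNat_natCast]
  rw [PySem.List.pyGetD_eq_getElem _ _ (Int.natCast_nonneg q) (by exact_mod_cast hq)]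
  simp only [Int.toNat_natCast]

lemma pvBfold_eq_spec (matrix : List (List Bool)) :
    List.foldl (fun g (d : Int × Int) => (PySem.List.pyRange 0 (matrix.length : Int) 1).foldl
        (fun g i => (PySem.List.pyRange 0 ((PySem.List.pyGetD matrix 0 []).length : Int) 1).foldl
          (pvF1 matrix d i) g) g)
      ((PySem.List.pyRange 0 (matrix.length : Int) 1).map
        (fun _ => List.replicate (PySem.List.pyGetD matrix 0 []).length true))
      [((0 : Int), (1 : Int)), (1, 0), (1, -1)]
      = pvSpecGrid matrix := by
  have htop := pvFoldMark matrix.length (PySem.List.pyGetD matrix 0 []).length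
    [((0 : Int), (1 : Int)), (1, 0), (1, -1)]
    (fun g d => (PySem.List.pyRange 0 (matrix.length : Int) 1).foldl
      (fun g i => (PySem.List.pyRange 0 ((PySem.List.pyGetD matrix 0 []).length : Int) 1).foldl
        (pvF1 matrix d i) g) g)
    (fun d p q => pvMark3 matrix d p q)
    (pvH3 matrix)
    ((PySem.List.pyRange 0 (matrix.length : Int) 1).map
      (fun _ => List.replicate (PySem.List.pyGetD matrix 0 []).length true))
    (pvShape_ans0 matrix)
  apply List.ext_getElem
  · rw [show (pvSpecGrid matrix).length = matrix.length from by
      simp [pvSpecGrid, PySem.List.length_pyRange_one]]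
    exact htop.1.1
  · intro p hp1 hp2
    have hp' : p < matrix.length := htop.1.1 ▸ hp1
    apply List.ext_getElem
    · rw [htop.1.2 _ (List.getElem_mem hp1)]
      simp [pvSpecGrid, PySem.List.length_pyRange_one]
    · intro q hq1 hq2
      have hq' : q < (PySem.List.pyGetD matrix 0 []).length := by
        have := htop.1.2 _ (List.getElem_mem hp1)
        omega
      calc _ = pvCell _ (p : Int) (q : Int) := (pvCell_eq_getElem _ p q hp1 hq1).symm
        _ = _ := htop.2 (p : Int) (q : Int) (by omega) (by exact_mod_cast hp')
              (by omega) (by exact_mod_cast hq')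
        _ = (true && !([((0 : Int), (1 : Int)), (1, 0), (1, -1)].any
              fun d => pvMark3 matrix d (p : Int) (q : Int))) := by
            rw [pvCell_ans0 matrix (p : Int) (q : Int) (by omega) (by exact_mod_cast hp')
              (by omega) (by exact_mod_cast hq')]
        _ = pvSpecCell matrix (p : Int) (q : Int) :=
            pvCellFinal matrix (p : Int) (q : Int) (by omega) (by exact_mod_cast hp')
              (by omega) (by exact_mod_cast hq')
        _ = _ := by
            simp [pvSpecGrid, PySem.List.getElem_pyRange_one]

lemma pvB_eq_spec (matrix : List (List Bool)) : holesErasing_alt matrix = pvSpecGrid matrix := by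
  by_cases hemp : matrix = []
  · subst hemp; rfl
  · unfold holesErasing_alt
    simp only [if_pos hemp, Int.toNat_natCast]
    exact pvBfold_eq_spec matrix

lemma pvStep_eq (Q P : Prop) [Decidable Q] [Decidable P] (b h : Bool) :
    (if Q then (if P then (if b then false else h) else h) else h)
    = (h && !(decide Q && (decide P && b))) := by
  by_cases hQ : Q <;> by_cases hP : P <;> cases b <;> simp [hQ, hP]

lemma pvHole_eq (matrix : List (List Bool)) (i j : Int) :
    ((PySem.List.pyRange (-1) 2 1).foldl (fun hole dx =>
      (PySem.List.pyRange (-1) 2 1).foldl (fun hole dy =>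
        if dx ≠ dy then
          if 0 ≤ i + dx ∧ i + dx < (matrix.length : Int) ∧
             0 ≤ j + dy ∧ j + dy < ((PySem.List.pyGetD matrix 0 []).length : Int) then
            if !(pvCell matrix (i + dx) (j + dy)) then false else hole
          else hole
        else hole) hole) true)
    = !(pvOffs6.any (fun d => pvZero matrix (i + d.1) (j + d.2))) := by
  rw [show PySem.List.pyRange (-1) 2 1 = [-1, 0, 1] by decide]
  simp only [List.foldl_cons, List.foldl_nil, pvStep_eq, pvOffs6, pvZero, List.any_cons,
    List.any_nil, Bool.or_false]
  simp only [show (decide ((-1:Int) ≠ -1)) = false by decide, show (decide ((-1:Int) ≠ 0)) = true by decide,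
    show (decide ((-1:Int) ≠ 1)) = true by decide, show (decide ((0:Int) ≠ -1)) = true by decide,
    show (decide ((0:Int) ≠ 0)) = false by decide, show (decide ((0:Int) ≠ 1)) = true by decide,
    show (decide ((1:Int) ≠ -1)) = true by decide, show (decide ((1:Int) ≠ 0)) = true by decide,
    show (decide ((1:Int) ≠ 1)) = false by decide, Bool.false_and, Bool.true_and, Bool.not_false,
    Bool.and_true, Bool.not_or, Bool.and_assoc]

lemma pvBranch_push (c h : Bool) (line : List Bool) :
    (if c then (if h then line ++ [true] else line ++ [false]) else line ++ [true])
    = line ++ [if c then (if h then true else false) else true] := by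
  cases c <;> cases h <;> rfl

lemma pvIte_or (c a : Bool) :
    (if !c then (if !a then (true : Bool) else false) else true) = (c || !a) := by
  cases c <;> cases a <;> rfl

lemma pvA_eq_spec (matrix : List (List Bool)) : holesErasing matrix = pvSpecGrid matrix := by
  simp only [holesErasing, pvSpecGrid, pvBranch_push, PySem.List.foldl_append_singleton_eq_map,
    pvHole_eq, pvIte_or, pvSpecCell, List.nil_append]

-- ===== VERDICT (by name: the statement is the Claim_ definition above) =====
theorem holesErasing_spec : Claim_equal_holesErasing := by
  intro matrix _ _
  unfold Spec_holesErasing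
  rw [pvA_eq_spec, pvB_eq_spec]
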